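-- pv_equiv track=rewrite | github.com/hardikkamboj/Hackerrank | Happy_ladybugs.py | check_nbhd
-- ===== SOURCE A (Python) =====
-- def check_nbhd(a):
--     n = len(a)
--     if n == 1:
--         if a[0] == '_':
--             return 'YES'
--         else:
--             return 'NO'
--     for i in range(n):
--         if a[i] == '_':
--             break
--         if i == 0 and a[0] != a[1]:
--             return 'NO'
--         elif i == n-1 and a[i] != a[i-1]:
--             return 'NO'
--         elif a[i-1] != a[i] and a[i+1] != a[i]:
--             return 'NO'
--
--     return 'YES'
-- ===== SOURCE B (Python) =====
-- def check_nbhd(a):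
--     # single pass: maintain the length of the current run of equal elements;
--     # a run of length 1 before the first '_' (or at the end) means a lonely ladybug -> 'NO'
--     prev = None
--     run = 0
--     for x in a:
--         if x == '_':
--             break
--         if x == prev:
--             run += 1
--         else:
--             if run == 1:
--                 return 'NO'
--             prev = x
--             run = 1
--     return 'NO' if run == 1 else 'YES'
-- ===== Notes on version B (the rewrite author's own statement) =====
-- stated objective: simpler
-- what changed: Replaces A's index-based scan with i-1/i+1 neighbour lookups and special cases for n==1, i==0 and i==n-1 by a single pass that keeps a run-length counter of consecutive equal elements and stops at the first '_', returning NO exactly when a run of length 1 closes.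
import Mathlib
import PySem

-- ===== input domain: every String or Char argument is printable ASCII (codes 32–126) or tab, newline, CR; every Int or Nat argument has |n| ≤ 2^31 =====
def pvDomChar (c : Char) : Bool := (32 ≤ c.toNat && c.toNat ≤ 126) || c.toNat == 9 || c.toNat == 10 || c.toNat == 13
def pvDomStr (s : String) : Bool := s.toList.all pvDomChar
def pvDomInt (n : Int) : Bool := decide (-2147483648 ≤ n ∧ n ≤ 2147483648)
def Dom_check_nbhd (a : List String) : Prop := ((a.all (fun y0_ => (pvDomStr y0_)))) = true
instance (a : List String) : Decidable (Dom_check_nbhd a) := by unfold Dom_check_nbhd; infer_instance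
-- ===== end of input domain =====

-- B replaces A's index arithmetic over the whole list by one pass with a run-length counter (objective: simpler).

-- ===== PORT A =====
-- the 'for i in range(n)' loop with early return / break; fuel = number of remaining indices
def pvALoop (a : List String) (n : Int) : Nat → Int → String
  | 0, _ => "YES"                                   -- loop ends : return 'YES'
  | k+1, i =>
    if PySem.List.pyGetD a i "" = "_" then "YES"    -- break, then return 'YES'
    else if i = 0 ∧ ¬ (PySem.List.pyGetD a 0 "" = PySem.List.pyGetD a 1 "") then "NO"
    else if i = n - 1 ∧ ¬ (PySem.List.pyGetD a i "" = PySem.List.pyGetD a (i-1) "") then "NO"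
    else if ¬ (PySem.List.pyGetD a (i-1) "" = PySem.List.pyGetD a i "") ∧
            ¬ (PySem.List.pyGetD a (i+1) "" = PySem.List.pyGetD a i "") then "NO"
    else pvALoop a n k (i+1)

def check_nbhd (a : List String) : String :=
  let n : Int := a.length
  if n = 1 then
    if PySem.List.pyGetD a 0 "" = "_" then "YES" else "NO"
  else pvALoop a n a.length 0

-- ===== PORT B =====
-- Source B's single for-loop: state (prev, run); break on '_' falls through to the final return
def pvBLoop : List String → Option String → Int → String
  | [], _, run => if run = 1 then "NO" else "YES"
  | x :: xs, prev, run =>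
    if x = "_" then (if run = 1 then "NO" else "YES")
    else if some x = prev then pvBLoop xs prev (run + 1)
    else if run = 1 then "NO"
    else pvBLoop xs (some x) 1

def check_nbhd_alt (a : List String) : String := pvBLoop a none 0

-- ===== PRECONDITION & SPEC =====
def Spec_check_nbhd (a : List String) (out : String) : Prop := out = check_nbhd_alt a
instance (a : List String) (out : String) : Decidable (Spec_check_nbhd a out) := by unfold Spec_check_nbhd; infer_instance

-- ===== CLAIM (what is proved, stated in full; the proofs are below) =====
def Claim_equal_check_nbhd : Prop := ∀ (a : List String), Dom_check_nbhd a → Spec_check_nbhd a (check_nbhd a)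

-- ===== LEMMAS AND PROOFS =====

-- Invariant bridge: at loop head i ≥ 1, B's state is (prev = a[i-1], run = r) where either the
-- current run already has length ≥ 2 (r ≠ 1) or A's check at i-1 guaranteed a[i] = a[i-1].
lemma pvBridge (a : List String) : ∀ (k i : Nat) (r : Int),
    i + k = a.length → 1 ≤ i →
    a.getD (i-1) "" ≠ "_" →
    1 ≤ r →
    (r ≠ 1 ∨ (i < a.length ∧ a.getD i "" = a.getD (i-1) "")) →
    pvALoop a (a.length : Int) k (i : Int) = pvBLoop (a.drop i) (some (a.getD (i-1) "")) r := by
  intro k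
  induction k with
  | zero =>
    intro i r hki hi hprev hr hH
    have hil : i = a.length := by omega
    have hr1 : r ≠ 1 := by
      rcases hH with h | h
      · exact h
      · omega
    simp [pvALoop, hil, List.drop_length, pvBLoop, hr1]
  | succ k ih =>
    intro i r hki hi hprev hr hH
    have hilen : i < a.length := by omega
    have hgd : a.getD i "" = a[i] := List.getD_eq_getElem a "" hilen
    have hdrop : a.drop i = a.getD i "" :: a.drop (i+1) := by
      rw [hgd]; exact List.drop_eq_getElem_cons hilen
    have hc1 : ((i : Int) - 1) = ((i - 1 : Nat) : Int) := by omega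
    have hc2 : ((i : Int) + 1) = ((i + 1 : Nat) : Int) := by omega
    rw [pvALoop, hc1, hc2]
    simp only [PySem.List.pyGetD_natCast]
    rw [hdrop]
    simp only [pvBLoop, Option.some.injEq]
    by_cases hx : a.getD i "" = "_"
    · -- a[i] == '_' : A breaks to YES; B breaks with run ≠ 1, also YES
      have hr1 : r ≠ 1 := by
        rcases hH with h | h
        · exact h
        · exact absurd (h.2.symm.trans hx) hprev
      rw [if_pos hx, if_pos hx, if_neg hr1]
    · rw [if_neg hx, if_neg hx,
        if_neg (fun h => absurd h.1 (by omega : ¬ ((i : Int) = 0)))]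
      by_cases hlast : i = a.length - 1
      · -- last index: the loop ends after this step
        have hk0 : k = 0 := by omega
        have hdrop1 : a.drop (i+1) = [] := List.drop_eq_nil_of_le (by omega)
        by_cases hm : a.getD i "" = a.getD (i-1) ""
        · -- matches its left neighbour: both YES
          rw [if_pos hm, if_neg (fun h => h.2 hm), if_neg (fun h => h.1 hm.symm),
            hk0, hdrop1]
          simp only [pvALoop, pvBLoop]
          rw [if_neg (by omega : ¬ (r + 1 = 1))]
        · -- lonely at the end: both NO
          have hr1 : r ≠ 1 := by
            rcases hH with h | h
            · exact h
            · exact absurd h.2 hm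
          rw [if_neg hm, if_neg hr1, if_pos ⟨by omega, hm⟩, hdrop1]
          simp only [pvBLoop]
          simp
      · -- middle index
        have hmid : i + 1 < a.length := by omega
        rw [if_neg (fun h => absurd h.1 (by omega : ¬ ((i : Int) = (a.length : Int) - 1)))]
        by_cases hm : a.getD i "" = a.getD (i-1) ""
        · -- run continues: both recurse, run + 1
          rw [if_pos hm, if_neg (fun h => h.1 hm.symm)]
          have hih := ih (i+1) (r+1) (by omega) (by omega)
            (by simpa using hx) (by omega) (Or.inl (by omega))
          rw [hih, Nat.add_sub_cancel, hm]
        · have hr1 : r ≠ 1 := by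
            rcases hH with h | h
            · exact h
            · exact absurd h.2 hm
          rw [if_neg hm, if_neg hr1]
          by_cases hnext : a.getD (i+1) "" = a.getD i ""
          · -- a new run starts and is extended by the next element: both recurse
            rw [if_neg (fun h => h.2 hnext)]
            have hih := ih (i+1) 1 (by omega) (by omega)
              (by simpa using hx) (by omega)
              (Or.inr ⟨by omega, by simpa using hnext⟩)
            rw [hih, Nat.add_sub_cancel]
          · -- lonely ladybug at i: A returns NO now, B one step later
            rw [if_pos ⟨fun h => hm h.symm, hnext⟩]
            have hdropm : a.drop (i+1) = a.getD (i+1) "" :: a.drop (i+1+1) := by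
              rw [List.getD_eq_getElem a "" hmid]
              exact List.drop_eq_getElem_cons hmid
            rw [hdropm]
            simp only [pvBLoop, Option.some.injEq]
            by_cases hnu : a.getD (i+1) "" = "_"
            · rw [if_pos hnu]; simp
            · rw [if_neg hnu, if_neg hnext]; simp

theorem check_nbhd_spec_aux : ∀ (a : List String), check_nbhd a = check_nbhd_alt a := by
  intro a
  match a with
  | [] => rfl
  | [x] =>
    by_cases hx : x = "_"
    · simp [check_nbhd, check_nbhd_alt, pvBLoop, PySem.List.pyGetD_zero_cons, hx]
    · simp [check_nbhd, check_nbhd_alt, pvBLoop, PySem.List.pyGetD_zero_cons, hx]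
  | x :: y :: rest =>
    have h0 : PySem.List.pyGetD (x :: y :: rest) 0 "" = x := PySem.List.pyGetD_zero_cons ..
    have h1 : PySem.List.pyGetD (x :: y :: rest) 1 "" = y := by
      simp [PySem.List.pyGetD, PySem.List.pyGet?, PySem.List.pyIdx?]
    simp only [check_nbhd, check_nbhd_alt, List.length_cons]
    rw [if_neg (by push_cast; omega : ¬ (((rest.length + 1 + 1 : Nat) : Int) = 1))]
    rw [pvALoop, pvBLoop]
    simp only [zero_add, h0, h1]
    by_cases hx : x = "_"
    · rw [if_pos hx, if_pos hx, if_neg (by omega : ¬ ((0 : Int) = 1))]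
    · rw [if_neg hx, if_neg hx, if_neg (by simp : ¬ (some x = none)),
        if_neg (by omega : ¬ ((0 : Int) = 1))]
      by_cases hxy : x = y
      · rw [if_neg (fun h => h.2 hxy),
          if_neg (fun h => absurd h.1 (by push_cast; omega)),
          if_neg (fun h => h.2 hxy.symm)]
        have hB := pvBridge (x :: y :: rest) (rest.length + 1) 1 1
          (by simp only [List.length_cons]; omega) (le_refl 1) (by simpa using hx)
          (le_refl 1)
          (Or.inr ⟨by simp only [List.length_cons]; omega,
            by simpa [List.getD] using hxy.symm⟩)
        simpa using hB
      · rw [if_pos ⟨by norm_num, fun h => hxy h⟩, pvBLoop]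
        by_cases hy : y = "_"
        · rw [if_pos hy, if_pos rfl]
        · rw [if_neg hy,
            if_neg (by simp only [Option.some.injEq]; exact fun h => hxy h.symm),
            if_pos rfl]

-- ===== VERDICT (by name: the statement is the Claim_ definition above) =====
theorem check_nbhd_spec : Claim_equal_check_nbhd := by
  intro a _
  exact check_nbhd_spec_aux a
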